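-- pv_equiv track=rewrite | github.com/lakamsani/NemoClaw | scripts/gog-query.py | select_task_lists
-- ===== SOURCE A (Python) =====
-- def normalize_text(value):
--     return " ".join(str(value or "").strip().lower().split())
--
-- def select_task_lists(task_lists, list_query, prefer_personal):
--     if not list_query and not prefer_personal:
--         return task_lists
--     if list_query:
--         wanted = normalize_text(list_query)
--         exact = [item for item in task_lists if normalize_text(item.get("title")) == wanted]
--         if exact:
--             return exact
--         partial = [item for item in task_lists if wanted in normalize_text(item.get("title"))]
--         if partial:
--             return partial
--         return task_lists
--     if prefer_personal:
--         personal = [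
--             item for item in task_lists
--             if normalize_text(item.get("title")).endswith("s list")
--             or normalize_text(item.get("title")) in {"my tasks", "personal", "personal tasks"}
--         ]
--         if personal:
--             return personal
--     return task_lists
-- ===== SOURCE B (Python) =====
-- def normalize_text(value):
--     return " ".join(str(value or "").strip().lower().split())
--
-- def select_task_lists(task_lists, list_query, prefer_personal):
--     # Rank-and-argmin: classify every item once with a numeric rank, then
--     # return the class of items achieving the best (minimum) rank, or the
--     # whole input when even the best rank is the "miss" rank.
--     if list_query:
--         wanted = normalize_text(list_query)
--         def rank(t):
--             if t == wanted:
--                 return 0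
--             if wanted in t:
--                 return 1
--             return 2
--         worst = 2
--     elif prefer_personal:
--         def rank(t):
--             if t.endswith("s list") or t in ("my tasks", "personal", "personal tasks"):
--                 return 0
--             return 1
--         worst = 1
--     else:
--         return task_lists
--     ranked = [(rank(normalize_text(item.get("title"))), item) for item in task_lists]
--     best = min((r for r, _ in ranked), default=worst)
--     if best == worst:
--         return task_lists
--     return [item for r, item in ranked if r == best]
-- ===== Notes on version B (the rewrite author's own statement) =====
-- stated objective: alternative
-- what changed: A's cascade of staged filters with early returns (exact, then substring, then personal, each a fresh pass with its own emptiness test) is replaced by rank-and-argmin selection: every item is classified once with a numeric rank (query mode: 0 exact / 1 substring / 2 miss; personal mode: 0 personal / 1 other), the minimum rank is taken with min(..., default=worst), and the argmin class is returned, falling back to the whole input when the best rank is the worst.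
import Mathlib
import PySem

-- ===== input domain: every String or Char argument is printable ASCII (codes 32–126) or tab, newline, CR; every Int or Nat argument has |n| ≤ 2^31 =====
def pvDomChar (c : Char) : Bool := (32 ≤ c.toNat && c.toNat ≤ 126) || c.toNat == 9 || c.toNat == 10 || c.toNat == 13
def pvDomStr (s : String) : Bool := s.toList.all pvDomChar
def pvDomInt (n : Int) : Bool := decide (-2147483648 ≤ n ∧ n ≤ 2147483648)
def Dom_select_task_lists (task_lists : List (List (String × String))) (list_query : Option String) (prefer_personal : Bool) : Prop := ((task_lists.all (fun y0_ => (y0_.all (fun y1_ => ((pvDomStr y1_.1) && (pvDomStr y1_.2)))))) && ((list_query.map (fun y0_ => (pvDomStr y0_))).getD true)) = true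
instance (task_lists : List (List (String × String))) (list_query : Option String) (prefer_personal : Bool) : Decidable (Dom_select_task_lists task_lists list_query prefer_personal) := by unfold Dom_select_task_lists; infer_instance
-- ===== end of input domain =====

-- B replaces A's cascade of filters with early returns by rank-and-argmin
-- selection: each item is classified once with a numeric rank and the class of
-- items achieving the minimum rank is returned (whole input if even the best
-- rank is the "miss" rank); alternative algorithm, same return value.

-- ===== PORT A =====
-- normalize_text(value) with value : Option String ('value or ""' = getD "")
def pvNorm (value : Option String) : String :=
  PySem.Str.join " " (PySem.Str.split₀ (PySem.Str.lower (PySem.Str.strip (value.getD ""))))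

-- Python truthiness of an Optional[str]
def pvTruthy (q : Option String) : Bool :=
  match q with
  | none => false
  | some s => !(s == "")

def select_task_lists (task_lists : List (List (String × String))) (list_query : Option String) (prefer_personal : Bool) : List (List (String × String)) :=
  if !pvTruthy list_query && !prefer_personal then task_lists
  else if pvTruthy list_query then
    let wanted := pvNorm list_query
    let exact := task_lists.filter (fun item => pvNorm ((PySem.Dict.mk item).get? "title") == wanted)
    if !exact.isEmpty then exact
    else
      let part := task_lists.filter (fun item => PySem.Str.isIn wanted (pvNorm ((PySem.Dict.mk item).get? "title")))
      if !part.isEmpty then part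
      else task_lists
  else if prefer_personal then
    let personal := task_lists.filter (fun item =>
      PySem.Str.endswith (pvNorm ((PySem.Dict.mk item).get? "title")) "s list"
      || (["my tasks", "personal", "personal tasks"] : List String).contains (pvNorm ((PySem.Dict.mk item).get? "title")))
    if !personal.isEmpty then personal else task_lists
  else task_lists

-- ===== PORT B =====
-- Source B's local rank(t) in the query branch
def pvRankQ (wanted t : String) : Nat :=
  if t == wanted then 0
  else if PySem.Str.isIn wanted t then 1
  else 2

-- Source B's local rank(t) in the prefer_personal branch
def pvRankP (t : String) : Nat :=
  if PySem.Str.endswith t "s list"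
     || (["my tasks", "personal", "personal tasks"] : List String).contains t then 0
  else 1

-- Source B's shared tail: best = min(ranks, default=worst); argmin class, or the
-- whole input when best == worst
def pvArgmin (ranked : List (Nat × List (String × String))) (worst : Nat)
    (task_lists : List (List (String × String))) : List (List (String × String)) :=
  let best := (PySem.List.min? (ranked.map Prod.fst) (fun r => r)).getD worst
  if best == worst then task_lists
  else (ranked.filter (fun p => p.1 == best)).map Prod.snd

def select_task_lists_alt (task_lists : List (List (String × String))) (list_query : Option String) (prefer_personal : Bool) : List (List (String × String)) :=
  if pvTruthy list_query then
    let wanted := pvNorm list_query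
    pvArgmin (task_lists.map (fun item =>
      (pvRankQ wanted (pvNorm ((PySem.Dict.mk item).get? "title")), item))) 2 task_lists
  else if prefer_personal then
    pvArgmin (task_lists.map (fun item =>
      (pvRankP (pvNorm ((PySem.Dict.mk item).get? "title")), item))) 1 task_lists
  else task_lists

-- ===== PRECONDITION & SPEC =====
def Spec_select_task_lists (task_lists : List (List (String × String))) (list_query : Option String) (prefer_personal : Bool) (out : List (List (String × String))) : Prop := out = select_task_lists_alt task_lists list_query prefer_personal
instance (task_lists : List (List (String × String))) (list_query : Option String) (prefer_personal : Bool) (out : List (List (String × String))) : Decidable (Spec_select_task_lists task_lists list_query prefer_personal out) := by unfold Spec_select_task_lists; infer_instance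

-- ===== CLAIM (what is proved, stated in full; the proofs are below) =====
def Claim_equal_select_task_lists : Prop := ∀ (task_lists : List (List (String × String))) (list_query : Option String) (prefer_personal : Bool), Dom_select_task_lists task_lists list_query prefer_personal → Spec_select_task_lists task_lists list_query prefer_personal (select_task_lists task_lists list_query prefer_personal)

-- ===== LEMMAS AND PROOFS =====

theorem pv_min_zero (rk : List (String × String) → Nat) (xs : List (List (String × String))) (w : Nat)
    (h : ∃ x ∈ xs, rk x = 0) :
    (PySem.List.min? (xs.map rk) (fun r => r)).getD w = 0 := by
  obtain ⟨x, hx, hr⟩ := h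
  have hmm : rk x ∈ xs.map rk := List.mem_map_of_mem hx
  cases hm : PySem.List.min? (xs.map rk) (fun r => r) with
  | none =>
    rw [PySem.List.min?_eq_none_iff] at hm
    rw [hm] at hmm
    simp at hmm
  | some m =>
    have hle := PySem.List.min?_isMin hm (rk x) hmm
    simp only [hr] at hle
    simp only [Option.getD_some]
    omega

theorem pv_min_one (rk : List (String × String) → Nat) (xs : List (List (String × String))) (w : Nat)
    (h0 : ∀ x ∈ xs, rk x ≠ 0) (h1 : ∃ x ∈ xs, rk x = 1) :
    (PySem.List.min? (xs.map rk) (fun r => r)).getD w = 1 := by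
  obtain ⟨x, hx, hr⟩ := h1
  have hmm : rk x ∈ xs.map rk := List.mem_map_of_mem hx
  cases hm : PySem.List.min? (xs.map rk) (fun r => r) with
  | none =>
    rw [PySem.List.min?_eq_none_iff] at hm
    rw [hm] at hmm
    simp at hmm
  | some m =>
    have hle := PySem.List.min?_isMin hm (rk x) hmm
    have hmem := PySem.List.min?_mem hm
    obtain ⟨y, hy, hym⟩ := List.mem_map.mp hmem
    have hy0 := h0 y hy
    simp only [hr] at hle
    simp only [Option.getD_some]
    omega

theorem pv_min_all (rk : List (String × String) → Nat) (xs : List (List (String × String))) (w : Nat)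
    (h : ∀ x ∈ xs, rk x = w) :
    (PySem.List.min? (xs.map rk) (fun r => r)).getD w = w := by
  cases hm : PySem.List.min? (xs.map rk) (fun r => r) with
  | none => simp
  | some m =>
    have hmem := PySem.List.min?_mem hm
    obtain ⟨y, hy, hym⟩ := List.mem_map.mp hmem
    simp [← hym, h y hy]

-- the argmin-class extraction over a ranked map is a plain filter
theorem pv_ranked_filter (rk : List (String × String) → Nat) (xs : List (List (String × String))) (b : Nat) :
    ((xs.map (fun x => (rk x, x))).filter (fun p => p.1 == b)).map Prod.snd
      = xs.filter (fun x => rk x == b) := by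
  induction xs with
  | nil => rfl
  | cons a t ih =>
    by_cases h : rk a = b <;> simp [h, ih]

-- rank-and-argmin with worst = 2 equals the two-stage filter cascade
theorem pv_argmin2 (rk : List (String × String) → Nat) (hrk : ∀ x, rk x ≤ 2)
    (xs : List (List (String × String))) :
    pvArgmin (xs.map (fun x => (rk x, x))) 2 xs =
      (if !(xs.filter (fun x => rk x == 0)).isEmpty then xs.filter (fun x => rk x == 0)
       else if !(xs.filter (fun x => rk x != 2)).isEmpty then xs.filter (fun x => rk x != 2)
       else xs) := by
  have hcomp : (Prod.fst ∘ fun x : List (String × String) => (rk x, x)) = rk := rfl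
  unfold pvArgmin
  simp only [List.map_map, hcomp]
  by_cases he : (xs.filter (fun x => rk x == 0)).isEmpty
  · have h0 : ∀ x ∈ xs, rk x ≠ 0 := by
      intro x hx
      have h := List.isEmpty_iff.mp he
      rw [List.filter_eq_nil_iff] at h
      simpa using h x hx
    by_cases hp : (xs.filter (fun x => rk x != 2)).isEmpty
    · have h2 : ∀ x ∈ xs, rk x = 2 := by
        intro x hx
        have h := List.isEmpty_iff.mp hp
        rw [List.filter_eq_nil_iff] at h
        simpa using h x hx
      rw [pv_min_all rk xs 2 h2]
      simp [he, hp]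
    · have h1 : ∃ x ∈ xs, rk x = 1 := by
        have hex : ∃ x ∈ xs, ¬ rk x = 2 := by simpa using hp
        obtain ⟨x, hx, hx2⟩ := hex
        exact ⟨x, hx, by have := h0 x hx; have := hrk x; omega⟩
      rw [pv_min_one rk xs 2 h0 h1]
      rw [pv_ranked_filter]
      simp only [he, hp, Bool.not_true, Bool.false_eq_true, if_false, Bool.not_false, if_true]
      norm_num
      apply List.filter_congr
      intro x hx
      have hx0 := h0 x hx
      have hx2 := hrk x
      rcases (by omega : rk x = 1 ∨ rk x = 2) with h | h <;> simp [h]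
  · have h0 : ∃ x ∈ xs, rk x = 0 := by simpa using he
    rw [pv_min_zero rk xs 2 h0]
    rw [pv_ranked_filter]
    simp [he]

-- rank-and-argmin with worst = 1 equals the single-filter fallback
theorem pv_argmin1 (rk : List (String × String) → Nat) (hrk : ∀ x, rk x ≤ 1)
    (xs : List (List (String × String))) :
    pvArgmin (xs.map (fun x => (rk x, x))) 1 xs =
      (if !(xs.filter (fun x => rk x == 0)).isEmpty then xs.filter (fun x => rk x == 0)
       else xs) := by
  have hcomp : (Prod.fst ∘ fun x : List (String × String) => (rk x, x)) = rk := rfl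
  unfold pvArgmin
  simp only [List.map_map, hcomp]
  by_cases he : (xs.filter (fun x => rk x == 0)).isEmpty
  · have h1 : ∀ x ∈ xs, rk x = 1 := by
      intro x hx
      have h := List.isEmpty_iff.mp he
      rw [List.filter_eq_nil_iff] at h
      have ha : rk x ≠ 0 := by simpa using h x hx
      have hb := hrk x
      omega
    rw [pv_min_all rk xs 1 h1]
    simp [he]
  · have h0 : ∃ x ∈ xs, rk x = 0 := by simpa using he
    rw [pv_min_zero rk xs 1 h0]
    rw [pv_ranked_filter]
    simp [he]

-- pointwise bridges between A's predicates and B's rank values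
theorem pv_rankQ_zero (w t : String) : (pvRankQ w t == 0) = (t == w) := by
  unfold pvRankQ; split_ifs with h1 h2 <;> simp_all

theorem pv_str_isIn_refl (t : String) : PySem.Str.isIn t t = true := by
  simp only [PySem.Str.isIn_eq, PySem.Chars.isIn_iff_infix]
  exact List.infix_refl _

theorem pv_rankQ_ne_two (w t : String) : (pvRankQ w t != 2) = PySem.Str.isIn w t := by
  unfold pvRankQ
  split_ifs with h1 h2
  · have ht : t = w := by simpa using h1
    subst ht
    rw [pv_str_isIn_refl]
    decide
  · rw [h2]
    decide
  · have h2' : PySem.Str.isIn w t = false := by simpa using h2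
    rw [h2']
    decide

theorem pv_rankP_zero (t : String) :
    (pvRankP t == 0) = (PySem.Str.endswith t "s list"
      || (["my tasks", "personal", "personal tasks"] : List String).contains t) := by
  unfold pvRankP; split_ifs with h <;> simp_all

-- ===== VERDICT (by name: the statement is the Claim_ definition above) =====
theorem select_task_lists_spec : Claim_equal_select_task_lists := by
  intro tl q pp _
  unfold Spec_select_task_lists select_task_lists select_task_lists_alt
  by_cases hq : pvTruthy q = true
  · simp only [hq, Bool.not_true, Bool.false_and, Bool.false_eq_true, if_false, if_true]
    rw [pv_argmin2 (fun item => pvRankQ (pvNorm q) (pvNorm ((PySem.Dict.mk item).get? "title")))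
      (fun x => by unfold pvRankQ; dsimp only; split_ifs <;> omega) tl]
    have hex : tl.filter (fun item => pvRankQ (pvNorm q) (pvNorm ((PySem.Dict.mk item).get? "title")) == 0)
        = tl.filter (fun item => pvNorm ((PySem.Dict.mk item).get? "title") == pvNorm q) := by
      apply List.filter_congr; intro x _; exact pv_rankQ_zero _ _
    have hpa : tl.filter (fun item => pvRankQ (pvNorm q) (pvNorm ((PySem.Dict.mk item).get? "title")) != 2)
        = tl.filter (fun item => PySem.Str.isIn (pvNorm q) (pvNorm ((PySem.Dict.mk item).get? "title"))) := by
      apply List.filter_congr; intro x _; exact pv_rankQ_ne_two _ _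
    rw [hex, hpa]
  · have hq' : pvTruthy q = false := by simpa using hq
    by_cases hp : pp = true
    · simp only [hq', hp, Bool.not_false, Bool.not_true, Bool.true_and, Bool.false_eq_true,
        if_false, if_true]
      rw [pv_argmin1 (fun item => pvRankP (pvNorm ((PySem.Dict.mk item).get? "title")))
        (fun x => by unfold pvRankP; dsimp only; split_ifs <;> omega) tl]
      have hpe : tl.filter (fun item => pvRankP (pvNorm ((PySem.Dict.mk item).get? "title")) == 0)
          = tl.filter (fun item =>
              PySem.Str.endswith (pvNorm ((PySem.Dict.mk item).get? "title")) "s list"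
              || (["my tasks", "personal", "personal tasks"] : List String).contains
                   (pvNorm ((PySem.Dict.mk item).get? "title"))) := by
        apply List.filter_congr; intro x _; exact pv_rankP_zero _
      rw [hpe]
    · have hp' : pp = false := by simpa using hp
      simp [hq', hp']
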